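-- pv_equiv track=rewrite | github.com/odpi/egeria-workspaces | compose-configs/egeria-quickstart/PyegeriaWebHandler/type_system_handler.py | _derive_area
-- ===== SOURCE A (Python) =====
-- AREA_ANCHORS: dict[str, int] = {
--     # Area 0 — Foundation (OpenMetadataRoot, Referenceable, and base infrastructure)
--     "OpenMetadataRoot": 0, "Referenceable": 0,
--     "SecurityAccessControl": 0, "SecurityGroup": 0,
--     # Area 1 — Collaboration (people, teams, organisations)
--     "Actor": 1, "ContactDetails": 1, "PersonRole": 1, "UserIdentity": 1,
--     "Team": 1, "Organization": 1,
--     # Area 2 — Assets, Connectors & Infrastructure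
--     "Asset": 2, "Connection": 2, "ConnectorType": 2, "Endpoint": 2,
--     "DeployedConnector": 2, "SoftwareCapability": 2, "ITInfrastructure": 2,
--     # Area 3 — Glossary & Semantics
--     "Glossary": 3, "GlossaryTerm": 3, "GlossaryCategory": 3,
--     # Area 4 — Governance
--     "GovernanceDefinition": 4, "GovernanceZone": 4, "SubjectAreaDefinition": 4,
--     "GovernanceMetric": 4, "GovernanceDashboard": 4, "GovernanceExecutionPoint": 4,
--     "GovernanceClassificationLevel": 4, "EngineAction": 4, "IncidentReport": 4,
--     "ContextEvent": 4, "DataProcessingDescription": 4,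
--     # Area 5 — Schemas
--     "SchemaType": 5, "SchemaAttribute": 5, "SchemaElement": 5,
--     # Area 6 — Data Stores
--     "DataStore": 6, "DataSet": 6, "DataFile": 6,
--     # Area 7 — Lineage
--     # Types whose supertype chain runs Referenceable→OpenMetadataRoot (area 0)
--     # without passing through Process are listed here explicitly.
--     "Process": 7, "Port": 7, "LineageMapping": 7,
--     "InformationSupplyChain": 7, "InformationSupplyChainSegment": 7,
--     "SolutionBlueprint": 7, "SolutionComponent": 7, "SolutionPort": 7,
-- }
--
-- def _derive_area(name: str, sup_map: dict, cache: dict) -> int: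
--     if name in cache:
--         return cache[name]
--     if name in AREA_ANCHORS:
--         cache[name] = AREA_ANCHORS[name]
--         return AREA_ANCHORS[name]
--     sup = sup_map.get(name)
--     result = _derive_area(sup, sup_map, cache) if sup else 0
--     cache[name] = result
--     return result
-- ===== SOURCE B (Python) =====
-- AREA_ANCHORS: dict[str, int] = {
--     "OpenMetadataRoot": 0, "Referenceable": 0,
--     "SecurityAccessControl": 0, "SecurityGroup": 0,
--     "Actor": 1, "ContactDetails": 1, "PersonRole": 1, "UserIdentity": 1,
--     "Team": 1, "Organization": 1,
--     "Asset": 2, "Connection": 2, "ConnectorType": 2, "Endpoint": 2,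
--     "DeployedConnector": 2, "SoftwareCapability": 2, "ITInfrastructure": 2,
--     "Glossary": 3, "GlossaryTerm": 3, "GlossaryCategory": 3,
--     "GovernanceDefinition": 4, "GovernanceZone": 4, "SubjectAreaDefinition": 4,
--     "GovernanceMetric": 4, "GovernanceDashboard": 4, "GovernanceExecutionPoint": 4,
--     "GovernanceClassificationLevel": 4, "EngineAction": 4, "IncidentReport": 4,
--     "ContextEvent": 4, "DataProcessingDescription": 4,
--     "SchemaType": 5, "SchemaAttribute": 5, "SchemaElement": 5,
--     "DataStore": 6, "DataSet": 6, "DataFile": 6,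
--     "Process": 7, "Port": 7, "LineageMapping": 7,
--     "InformationSupplyChain": 7, "InformationSupplyChainSegment": 7,
--     "SolutionBlueprint": 7, "SolutionComponent": 7, "SolutionPort": 7,
-- }
--
--
-- def _derive_area(name: str, sup_map: dict, cache: dict) -> int:
--     # Staged version: (1) materialise the supertype chain as a list,
--     # (2) classify its terminal element, (3) back-fill the cache.
--     chain = [name]
--     while chain[-1] not in cache and chain[-1] not in AREA_ANCHORS:
--         sup = sup_map.get(chain[-1])
--         if not sup:
--             break
--         chain.append(sup)
--     last = chain[-1]
--     result = cache.get(last, AREA_ANCHORS.get(last, 0))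
--     for n in chain:
--         if n not in cache:
--             cache[n] = result
--     return result
-- ===== Notes on version B (the rewrite author's own statement) =====
-- stated objective: alternative
-- what changed: Replaces the self-recursive walk with three staged passes: a loop that materialises the supertype chain as a list, a single classification of the chain's terminal element, and one back-fill pass over the chain writing the cache.
import Mathlib
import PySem

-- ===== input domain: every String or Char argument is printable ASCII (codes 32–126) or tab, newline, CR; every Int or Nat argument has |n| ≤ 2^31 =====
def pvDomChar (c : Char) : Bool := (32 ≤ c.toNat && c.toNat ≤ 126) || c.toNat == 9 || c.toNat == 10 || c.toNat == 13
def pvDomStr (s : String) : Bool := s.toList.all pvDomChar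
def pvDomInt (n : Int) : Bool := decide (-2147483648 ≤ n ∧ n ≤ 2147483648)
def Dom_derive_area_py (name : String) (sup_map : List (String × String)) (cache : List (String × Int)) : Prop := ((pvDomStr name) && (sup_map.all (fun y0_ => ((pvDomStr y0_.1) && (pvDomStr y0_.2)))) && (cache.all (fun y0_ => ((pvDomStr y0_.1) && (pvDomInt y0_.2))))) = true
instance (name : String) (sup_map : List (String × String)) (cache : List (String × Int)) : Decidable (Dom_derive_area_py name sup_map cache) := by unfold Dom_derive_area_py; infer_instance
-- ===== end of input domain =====

-- B replaces A's one-shot recursion by three staged passes: build the chain of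
-- supertype names as a list, classify its terminal element, back-fill the cache
-- (objective: alternative decomposition, no speed claim).  Both Pythons mutate
-- `cache` identically (same entries; insertion order of the back-fill differs);
-- the theorems here are about the RETURN value only.

-- AREA_ANCHORS, shared module constant (dict[str,int] as an association list).
def AREA_ANCHORS : List (String × Int) :=
  [("OpenMetadataRoot", 0), ("Referenceable", 0),
   ("SecurityAccessControl", 0), ("SecurityGroup", 0),
   ("Actor", 1), ("ContactDetails", 1), ("PersonRole", 1), ("UserIdentity", 1),
   ("Team", 1), ("Organization", 1),
   ("Asset", 2), ("Connection", 2), ("ConnectorType", 2), ("Endpoint", 2),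
   ("DeployedConnector", 2), ("SoftwareCapability", 2), ("ITInfrastructure", 2),
   ("Glossary", 3), ("GlossaryTerm", 3), ("GlossaryCategory", 3),
   ("GovernanceDefinition", 4), ("GovernanceZone", 4), ("SubjectAreaDefinition", 4),
   ("GovernanceMetric", 4), ("GovernanceDashboard", 4), ("GovernanceExecutionPoint", 4),
   ("GovernanceClassificationLevel", 4), ("EngineAction", 4), ("IncidentReport", 4),
   ("ContextEvent", 4), ("DataProcessingDescription", 4),
   ("SchemaType", 5), ("SchemaAttribute", 5), ("SchemaElement", 5),
   ("DataStore", 6), ("DataSet", 6), ("DataFile", 6),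
   ("Process", 7), ("Port", 7), ("LineageMapping", 7),
   ("InformationSupplyChain", 7), ("InformationSupplyChainSegment", 7),
   ("SolutionBlueprint", 7), ("SolutionComponent", 7), ("SolutionPort", 7)]

-- ===== PORT A =====
-- A's self-recursion, with a fuel counter as the usual totality guard; under
-- Pre_ the chain reaches a terminal case before the fuel runs out (see Pre_).
def deriveAreaRec (fuel : Nat) (name : String) (sup_map : List (String × String)) (cache : List (String × Int)) : Int :=
  match fuel with
  | 0 => 0
  | f + 1 =>
    match List.lookup name cache with          -- if name in cache: return cache[name]
    | some v => v
    | none =>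
      match List.lookup name AREA_ANCHORS with -- if name in AREA_ANCHORS: cache and return it
      | some a => a
      | none =>
        match List.lookup name sup_map with    -- sup = sup_map.get(name)
        | some sup =>                           -- result = _derive_area(sup, …) if sup else 0
          if sup ≠ "" then deriveAreaRec f sup sup_map cache else 0
        | none => 0

def derive_area_py (name : String) (sup_map : List (String × String)) (cache : List (String × Int)) : Int :=
  deriveAreaRec (sup_map.length + 1) name sup_map cache

-- ===== PORT B =====
-- the while-loop condition: chain[-1] not in cache and not in AREA_ANCHORS
def resolvedB (cache : List (String × Int)) (n : String) : Bool :=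
  (List.lookup n cache).isSome || (List.lookup n AREA_ANCHORS).isSome

-- stage 1: the while loop growing `chain`; `cur` tracks chain[-1] (fuel guard as above)
def buildChainB : Nat → List (String × String) → List (String × Int) → List String → String → List String
  | 0, _, _, chain, _ => chain
  | f + 1, sm, c, chain, cur =>
    if resolvedB c cur then chain
    else
      match List.lookup cur sm with             -- sup = sup_map.get(chain[-1])
      | some sup =>
        if sup = "" then chain                  -- if not sup: break
        else buildChainB f sm c (chain ++ [sup]) sup
      | none => chain

-- stage 2: result = cache.get(last, AREA_ANCHORS.get(last, 0))
def classifyB (cache : List (String × Int)) (last : String) : Int :=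
  match List.lookup last cache with
  | some v => v
  | none => (List.lookup last AREA_ANCHORS).getD 0

def derive_area_py_alt (name : String) (sup_map : List (String × String)) (cache : List (String × Int)) : Int :=
  let chain := buildChainB (sup_map.length + 1) sup_map cache [name] name
  -- chain is nonempty (starts as [name]); getLastD is chain[-1].
  -- stage 3 (the cache back-fill loop) is a side effect only and is dropped here.
  classifyB cache (chain.getLastD name)

-- ===== PRECONDITION & SPEC =====
-- Graph reachability on the input: does `cur` reach, following sup_map edges
-- (at most `fuel` of them), a terminal name — one in cache or AREA_ANCHORS, or
-- one with a missing/empty supertype?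
def chainTerminates (sup_map : List (String × String)) (cache : List (String × Int)) : Nat → String → Bool
  | 0, _ => false
  | f + 1, cur =>
    resolvedB cache cur ||
    match List.lookup cur sup_map with
    | some s => s = "" || chainTerminates sup_map cache f s
    | none => true

-- Pre_ excludes exactly the inputs on which A raises RecursionError: those where
-- `name` lies on a sup_map cycle not cut by any cache/anchor/empty terminal.  On
-- every input where A returns, the path visits pairwise-distinct keys of sup_map,
-- so a terminal is reached within sup_map.length + 1 edges and Pre_ holds.
def Pre_derive_area_py (name : String) (sup_map : List (String × String)) (cache : List (String × Int)) : Prop :=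
  chainTerminates sup_map cache (sup_map.length + 1) name = true

instance (name : String) (sup_map : List (String × String)) (cache : List (String × Int)) : Decidable (Pre_derive_area_py name sup_map cache) := by unfold Pre_derive_area_py; infer_instance

def pvWitness_derive_area_py : String × (List (String × String)) × (List (String × Int)) :=
  ("X", [("X", "Asset")], [("Y", 3)])

def Spec_derive_area_py (name : String) (sup_map : List (String × String)) (cache : List (String × Int)) (out : Int) : Prop := out = derive_area_py_alt name sup_map cache
instance (name : String) (sup_map : List (String × String)) (cache : List (String × Int)) (out : Int) : Decidable (Spec_derive_area_py name sup_map cache out) := by unfold Spec_derive_area_py; infer_instance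

-- ===== CLAIM (what is proved, stated in full; the proofs are below) =====
def Claim_equal_derive_area_py : Prop := ∀ (name : String) (sup_map : List (String × String)) (cache : List (String × Int)), Dom_derive_area_py name sup_map cache → Pre_derive_area_py name sup_map cache → Spec_derive_area_py name sup_map cache (derive_area_py name sup_map cache)

-- ===== LEMMAS AND PROOFS =====

-- Core invariant: if A's walk from `cur` terminates within `fuel` steps, then
-- classifying the last element of B's chain (whose last element is `cur` on
-- entry) yields exactly A's recursive result, for any chain prefix `acc`.
theorem classify_build_eq_rec (sm : List (String × String)) (cache : List (String × Int)) :
    ∀ (fuel : Nat) (cur : String) (acc : List String),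
      chainTerminates sm cache fuel cur = true →
      classifyB cache ((buildChainB fuel sm cache (acc ++ [cur]) cur).getLastD "") =
        deriveAreaRec fuel cur sm cache := by
  intro fuel
  induction fuel with
  | zero => intro cur acc h; simp [chainTerminates] at h
  | succ f ih =>
    intro cur acc h
    simp only [chainTerminates] at h
    simp only [buildChainB, deriveAreaRec]
    by_cases hres : resolvedB cache cur = true
    · simp only [hres]
      unfold resolvedB at hres
      cases hc : List.lookup cur cache with
      | some v => simp [classifyB, hc]
      | none =>
        cases ha : List.lookup cur AREA_ANCHORS with
        | some a => simp [classifyB, hc, ha]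
        | none => simp [hc, ha] at hres
    · have hc : List.lookup cur cache = none := by
        unfold resolvedB at hres
        cases hc : List.lookup cur cache with
        | some v => simp [hc] at hres
        | none => rfl
      have ha : List.lookup cur AREA_ANCHORS = none := by
        unfold resolvedB at hres
        cases ha : List.lookup cur AREA_ANCHORS with
        | some a => simp [ha] at hres
        | none => rfl
      rw [if_neg hres]
      simp only [hc, ha]
      cases hs : List.lookup cur sm with
      | none => simp [classifyB, hc, ha]
      | some sup =>
        by_cases hsup : sup = ""
        · simp [hsup, classifyB, hc, ha]
        · have hterm : chainTerminates sm cache f sup = true := by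
            simp [hres, hs, hsup] at h; exact h
          have hrec := ih sup (acc ++ [cur]) hterm
          simpa [hsup, List.append_assoc] using hrec
        
-- ===== VERDICT (by name: the statement is the Claim_ definition above) =====
theorem derive_area_py_spec : Claim_equal_derive_area_py := by
  intro name sup_map cache _dom pre
  unfold Spec_derive_area_py derive_area_py derive_area_py_alt
  have hmain := classify_build_eq_rec sup_map cache (sup_map.length + 1) name [] pre
  simp only [List.nil_append] at hmain
  have hne : buildChainB (sup_map.length + 1) sup_map cache [name] name ≠ [] := by
    have hgen : ∀ (f : Nat) (ch : List String) (cur : String), ch ≠ [] →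
        buildChainB f sup_map cache ch cur ≠ [] := by
      intro f
      induction f with
      | zero => intro ch cur h; simpa [buildChainB] using h
      | succ g ih =>
        intro ch cur h
        simp only [buildChainB]
        split
        · exact h
        · cases hs : List.lookup cur sup_map with
          | none => simpa [hs] using h
          | some sup =>
            by_cases hsup : sup = ""
            · simpa [hs, hsup] using h
            · simp only [if_neg hsup]
              exact ih (ch ++ [sup]) sup (by simp)
    exact hgen _ [name] name (by simp)
  simp only [List.getLastD_eq_getLast?] at hmain ⊢
  cases hx : (buildChainB (sup_map.length + 1) sup_map cache [name] name).getLast? with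
  | none => exact absurd (List.getLast?_eq_none_iff.mp hx) hne
  | some a =>
    simp only [hx, Option.getD_some] at hmain ⊢
    exact hmain.symm
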